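-- pv_equiv track=rewrite | github.com/kyle-berkey04/image-stegonography-hackohio | image_stego.py | is_top_heavy
-- ===== SOURCE A (Python) =====
-- def is_top_heavy(data, BASE_COLOR):
--   """
--   Determines whether a list is "top heavy", meaning its data is likely on the left.
--   :param
--   """
--   left_0_len = 0
--   for i in range(len(data)):
--     if data[i] != BASE_COLOR:
--       break
--     left_0_len += 1
--
--   right_0_len = 0
--   for i in range(len(data) - 1, -1, -1):
--     if data[i] != BASE_COLOR:
--       break
--     right_0_len += 1
--
--   return left_0_len < right_0_len
-- ===== SOURCE B (Python) =====
-- def is_top_heavy(data, BASE_COLOR):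
--   lead = 0
--   lead_done = False
--   trail = 0
--   for x in data:
--     if x == BASE_COLOR:
--       if not lead_done:
--         lead += 1
--       trail += 1
--     else:
--       lead_done = True
--       trail = 0
--   return lead < trail
-- ===== Notes on version B (the rewrite author's own statement) =====
-- stated objective: simpler
-- what changed: Replaces the two opposite-direction index loops with early break by one forward pass over the elements that freezes the leading count at the first mismatch and resets the trailing count on every mismatch.
import Mathlib
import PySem

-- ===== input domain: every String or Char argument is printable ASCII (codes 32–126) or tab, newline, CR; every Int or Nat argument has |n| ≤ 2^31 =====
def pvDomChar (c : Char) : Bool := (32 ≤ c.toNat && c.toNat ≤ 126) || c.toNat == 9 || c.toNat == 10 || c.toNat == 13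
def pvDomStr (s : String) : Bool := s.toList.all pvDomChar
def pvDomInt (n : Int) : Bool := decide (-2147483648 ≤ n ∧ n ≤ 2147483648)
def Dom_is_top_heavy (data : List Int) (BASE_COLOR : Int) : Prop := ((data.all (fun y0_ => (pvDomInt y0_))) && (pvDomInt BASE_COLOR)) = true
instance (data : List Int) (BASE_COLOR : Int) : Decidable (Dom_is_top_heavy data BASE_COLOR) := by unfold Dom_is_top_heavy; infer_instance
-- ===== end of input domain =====

-- B replaces A's two opposite-direction early-break loops by one forward pass (objective: simpler).
-- ===== PORT A =====
-- A's first loop: scan data[0], data[1], … and count until the first element ≠ BASE_COLOR (break).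
def pvLeadLoop (xs : List Int) (b : Int) : Int :=
  match xs with
  | [] => 0
  | x :: rest => if x ≠ b then 0 else pvLeadLoop rest b + 1

def is_top_heavy (data : List Int) (BASE_COLOR : Int) : Bool :=
  let left_0_len := pvLeadLoop data BASE_COLOR
  -- A's second loop visits data[len-1], …, data[0], i.e. the reversed list, with the same body.
  let right_0_len := pvLeadLoop data.reverse BASE_COLOR
  decide (left_0_len < right_0_len)

-- ===== PORT B =====
-- single forward pass carrying (lead, lead_done, trail)
def pvAltLoop (b : Int) (xs : List Int) (lead : Int) (lead_done : Bool) (trail : Int) : Int × Int :=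
  match xs with
  | [] => (lead, trail)
  | x :: rest =>
    if x = b then pvAltLoop b rest (if lead_done then lead else lead + 1) lead_done (trail + 1)
    else pvAltLoop b rest lead true 0

def is_top_heavy_alt (data : List Int) (BASE_COLOR : Int) : Bool :=
  let r := pvAltLoop BASE_COLOR data 0 false 0
  decide (r.1 < r.2)

-- ===== PRECONDITION & SPEC =====
def Spec_is_top_heavy (data : List Int) (BASE_COLOR : Int) (out : Bool) : Prop := out = is_top_heavy_alt data BASE_COLOR
instance (data : List Int) (BASE_COLOR : Int) (out : Bool) : Decidable (Spec_is_top_heavy data BASE_COLOR out) := by unfold Spec_is_top_heavy; infer_instance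

-- ===== CLAIM (what is proved, stated in full; the proofs are below) =====
def Claim_equal_is_top_heavy : Prop := ∀ (data : List Int) (BASE_COLOR : Int), Dom_is_top_heavy data BASE_COLOR → Spec_is_top_heavy data BASE_COLOR (is_top_heavy data BASE_COLOR)

-- ===== LEMMAS AND PROOFS =====
lemma pvLeadLoop_append_of_all {xs : List Int} {b : Int} (h : ∀ x ∈ xs, x = b) (ys : List Int) :
    pvLeadLoop (xs ++ ys) b = (xs.length : Int) + pvLeadLoop ys b := by
  induction xs with
  | nil => simp only [List.nil_append, List.length_nil, Nat.cast_zero, zero_add]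
  | cons x rest ih =>
    have hx : x = b := h x (by simp)
    simp only [List.cons_append, pvLeadLoop, hx, ne_eq, not_true_eq_false, if_false,
      ih (fun y hy => h y (by simp [hy])), List.length_cons]
    push_cast; ring

lemma pvLeadLoop_append_of_not_all {xs : List Int} {b : Int} (h : ¬ ∀ x ∈ xs, x = b) (ys : List Int) :
    pvLeadLoop (xs ++ ys) b = pvLeadLoop xs b := by
  induction xs with
  | nil => exact absurd (by simp) h
  | cons x rest ih =>
    by_cases hx : x = b
    · have hr : ¬ ∀ y ∈ rest, y = b := by
        intro hr
        exact h (List.forall_mem_cons.mpr ⟨hx, hr⟩)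
      simp [pvLeadLoop, hx, ih hr]
    · simp [pvLeadLoop, hx]

lemma pvLeadLoop_eq_length_of_all {xs : List Int} {b : Int} (h : ∀ x ∈ xs, x = b) :
    pvLeadLoop xs b = (xs.length : Int) := by
  have := pvLeadLoop_append_of_all h ([] : List Int)
  simpa [pvLeadLoop] using this

-- characterisation of B's single pass in terms of A's two runs
lemma pvAltLoop_eq (b : Int) : ∀ (xs : List Int) (lead : Int) (d : Bool) (trail : Int),
    pvAltLoop b xs lead d trail =
      ((if d then lead else lead + pvLeadLoop xs b),
       if ∀ x ∈ xs, x = b then trail + (xs.length : Int) else pvLeadLoop xs.reverse b) := by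
  intro xs
  induction xs with
  | nil => intro lead d trail; cases d <;> simp [pvAltLoop, pvLeadLoop]
  | cons x rest ih =>
    intro lead d trail
    by_cases hx : x = b
    · simp only [pvAltLoop, if_pos hx, ih]
      simp only [Prod.mk.injEq]
      constructor
      · cases d <;> simp [pvLeadLoop, hx] <;> ring
      · by_cases hr : ∀ y ∈ rest, y = b
        · have hall : ∀ y ∈ x :: rest, y = b := List.forall_mem_cons.mpr ⟨hx, hr⟩
          simp only [if_pos hr, if_pos hall, List.length_cons]
          push_cast; ring
        · have hnall : ¬ ∀ y ∈ x :: rest, y = b := fun h => hr (List.forall_mem_cons.mp h).2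
          simp only [if_neg hr, if_neg hnall, List.reverse_cons]
          exact (pvLeadLoop_append_of_not_all (fun h => hr (fun y hy => h y (List.mem_reverse.mpr hy))) _).symm
    · simp only [pvAltLoop, if_neg hx, ih]
      have hnall : ¬ ∀ y ∈ x :: rest, y = b := fun h => hx (List.forall_mem_cons.mp h).1
      simp only [Prod.mk.injEq]
      constructor
      · cases d <;> simp [pvLeadLoop, hx]
      · simp only [if_neg hnall, List.reverse_cons]
        by_cases hr : ∀ y ∈ rest, y = b
        · have hrev : ∀ y ∈ rest.reverse, y = b := fun y hy => hr y (List.mem_reverse.mp hy)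
          rw [if_pos hr, pvLeadLoop_append_of_all hrev]
          simp [pvLeadLoop, hx]
        · have hrev : ¬ ∀ y ∈ rest.reverse, y = b := fun h => hr (fun y hy => h y (List.mem_reverse.mpr hy))
          rw [if_neg hr, pvLeadLoop_append_of_not_all hrev]

-- ===== VERDICT (by name: the statement is the Claim_ definition above) =====
theorem is_top_heavy_spec : Claim_equal_is_top_heavy := by
  intro data b _
  unfold Spec_is_top_heavy is_top_heavy is_top_heavy_alt
  rw [pvAltLoop_eq]
  by_cases h : ∀ x ∈ data, x = b
  · have hrev : ∀ x ∈ data.reverse, x = b := by intro y hy; exact h y (by simpa using hy)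
    simp [pvLeadLoop_eq_length_of_all h, pvLeadLoop_eq_length_of_all hrev]
  · simp [h]
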